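-- pv_equiv track=rewrite | github.com/heasun0111/Algorithm | python/coding_test.py | solution
-- ===== SOURCE A (Python) =====
-- def solution(call):
--     answer=''
--     li=[]
--     count={}
--     tmp_L=call.lower()
--     for i in range(len(tmp_L)):
--         li.append(tmp_L[i])
--
--     for j in li:
--         try: count[j] += 1
--         except: count[j] = 1
--
--     maxN=-1
--     many=[]
--     for value in count.values():
--         if value>maxN:
--             maxN=value
--
--     for key, value in count.items():
--         if value==maxN:
--             many.append(key)
--
--     idx=[]
--     for k in range(len(tmp_L)):
--         for l in range(len(many)):
--             if tmp_L[k]==many[l]: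
--                 idx.append(str(k))
--
--     for m in range(len(call)):
--         if str(m) not in idx:
--             answer=answer+call[m]
--
--     return answer
-- ===== SOURCE B (Python) =====
-- def solution(call):
--     low = call.lower()
--     count = {}
--     for c in low:
--         count[c] = count.get(c, 0) + 1
--     maxN = max(count.values(), default=-1)
--     return ''.join(ch for ch, c in zip(call, low) if count[c] != maxN)
-- ===== Notes on version B (the rewrite author's own statement) =====
-- stated objective: faster
-- what changed: B drops A's position-list machinery (the list of max-frequency letters and the list of stringified positions to delete, membership-tested per character): B counts lowercased characters once, takes the max count, and keeps each character in one pass when its lowercased count differs from the max.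
import Mathlib
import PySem

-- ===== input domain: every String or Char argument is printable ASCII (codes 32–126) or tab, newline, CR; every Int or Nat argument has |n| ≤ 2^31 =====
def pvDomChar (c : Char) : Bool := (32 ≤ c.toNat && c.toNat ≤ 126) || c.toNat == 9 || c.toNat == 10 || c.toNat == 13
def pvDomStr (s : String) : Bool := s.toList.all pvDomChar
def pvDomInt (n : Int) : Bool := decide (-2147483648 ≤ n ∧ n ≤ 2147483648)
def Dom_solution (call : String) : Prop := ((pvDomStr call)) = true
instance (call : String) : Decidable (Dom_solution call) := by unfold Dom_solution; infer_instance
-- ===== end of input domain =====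

-- B replaces A's str(k)-position lists ('many', 'idx') by one counting pass and a direct
-- per-character frequency test; the theorem proves A = B on all printable-ASCII strings.


-- ===== PORT A =====
def solution (call : String) : String :=
  let answer : List Char := []
  let li : List Char := []
  let count : PySem.Dict Char Int := PySem.Dict.empty
  let tmpL : List Char := PySem.Chars.lower call.toList
  -- for i in range(len(tmp_L)): li.append(tmp_L[i])   (index always in range: pyGetD exact here)
  let li := (PySem.List.pyRange 0 (tmpL.length : Int) 1).foldl
    (fun acc i => acc ++ [PySem.List.pyGetD tmpL i ' ']) li
  -- for j in li: try count[j] += 1 / except: count[j] = 1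
  let count := li.foldl
    (fun d j => match d.get? j with
      | some v => d.insert j (v + 1)
      | none => d.insert j 1) count
  -- running max over values, start -1
  let maxN : Int := count.values.foldl (fun m v => if v > m then v else m) (-1)
  -- keys of maximal value
  let many : List Char := count.items.foldl
    (fun acc kv => if kv.2 = maxN then acc ++ [kv.1] else acc) []
  -- idx: str(k) for each position k whose (lowered) char matches some element of many
  let idx : List String := (PySem.List.pyRange 0 (tmpL.length : Int) 1).foldl
    (fun acc k => (PySem.List.pyRange 0 (many.length : Int) 1).foldl
      (fun acc2 l => if PySem.List.pyGetD tmpL k ' ' = PySem.List.pyGetD many l ' '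
                     then acc2 ++ [PySem.Int.toStr k] else acc2) acc) []
  -- for m in range(len(call)): if str(m) not in idx: answer += call[m]
  let answer := (PySem.List.pyRange 0 (call.toList.length : Int) 1).foldl
    (fun acc m => if PySem.Int.toStr m ∈ idx then acc
                  else acc ++ [PySem.List.pyGetD call.toList m ' ']) answer
  String.ofList answer

-- ===== PORT B =====
def solution_alt (call : String) : String :=
  let low : List Char := PySem.Chars.lower call.toList
  let count : PySem.Dict Char Int :=
    low.foldl (fun d c => d.insert c (d.getD c 0 + 1)) PySem.Dict.empty
  let maxN : Int := PySem.List.maxD count.values (fun v => v) (-1)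
  -- count[c] never raises: every c in the zip is a key of count (getD exact here)
  String.ofList ((((call.toList).zip low).filter
    (fun p => count.getD p.2 0 ≠ maxN)).map (fun p => p.1))

-- ===== PRECONDITION & SPEC =====
def Spec_solution (call : String) (out : String) : Prop := out = solution_alt call
instance (call : String) (out : String) : Decidable (Spec_solution call out) := by unfold Spec_solution; infer_instance

-- ===== CLAIM (what is proved, stated in full; the proofs are below) =====
def Claim_equal_solution : Prop := ∀ (call : String), Dom_solution call → Spec_solution call (solution call)

-- ===== LEMMAS AND PROOFS =====

def digitsRec (n : Nat) : List Char :=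
  if _h : n < 10 then [Nat.digitChar n]
  else digitsRec (n / 10) ++ [Nat.digitChar (n % 10)]
  decreasing_by exact Nat.div_lt_self (by omega) (by omega)

theorem digitsRec_small {n : Nat} (h : n < 10) : digitsRec n = [Nat.digitChar n] := by
  rw [digitsRec]; simp [h]

theorem digitsRec_big {n : Nat} (h : ¬ n < 10) :
    digitsRec n = digitsRec (n / 10) ++ [Nat.digitChar (n % 10)] := by
  conv_lhs => rw [digitsRec]
  simp [h]

theorem digitsRec_ne_nil (n : Nat) : digitsRec n ≠ [] := by
  by_cases h : n < 10
  · rw [digitsRec_small h]; simp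
  · rw [digitsRec_big h]; simp

theorem toDigitsCore_eq_digitsRec : ∀ (f n : Nat) (l : List Char), n < f →
    Nat.toDigitsCore 10 f n l = digitsRec n ++ l := by
  intro f
  induction f with
  | zero => omega
  | succ f ih =>
    intro n l hn
    show (if n / 10 = 0 then Nat.digitChar (n % 10) :: l
          else Nat.toDigitsCore 10 f (n/10) (Nat.digitChar (n % 10) :: l)) = digitsRec n ++ l
    by_cases h : n < 10
    · rw [if_pos (by omega), digitsRec_small h, Nat.mod_eq_of_lt h]; simp
    · rw [if_neg (by omega), ih (n/10) _ (by omega), digitsRec_big h]; simp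

theorem digitChar_inj_lt : ∀ x < 10, ∀ y < 10, Nat.digitChar x = Nat.digitChar y → x = y := by decide

theorem digitsRec_inj : ∀ (m k : Nat), digitsRec m = digitsRec k → m = k := by
  intro m
  induction m using Nat.strong_induction_on with
  | _ m ih =>
    intro k h
    by_cases hm : m < 10 <;> by_cases hk : k < 10
    · rw [digitsRec_small hm, digitsRec_small hk] at h
      exact digitChar_inj_lt m hm k hk (by injection h)
    · rw [digitsRec_small hm, digitsRec_big hk] at h
      cases hrec : digitsRec (k / 10) with
      | nil => exact absurd hrec (digitsRec_ne_nil _)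
      | cons a t => rw [hrec] at h; simp at h
    · rw [digitsRec_big hm, digitsRec_small hk] at h
      cases hrec : digitsRec (m / 10) with
      | nil => exact absurd hrec (digitsRec_ne_nil _)
      | cons a t => rw [hrec] at h; simp at h
    · rw [digitsRec_big hm, digitsRec_big hk] at h
      have h2 := List.append_inj' h (by simp)
      have hdiv := ih (m/10) (Nat.div_lt_self (by omega) (by omega)) (k/10) h2.1
      have hmod : m % 10 = k % 10 :=
        digitChar_inj_lt _ (Nat.mod_lt _ (by omega)) _ (Nat.mod_lt _ (by omega)) (by injection h2.2)
      omega

theorem toStr_natCast_inj (m k : Nat) (h : PySem.Int.toStr (↑m) = PySem.Int.toStr (↑k)) : m = k := by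
  have h2 : PySem.Int.toChars (↑m) = PySem.Int.toChars (↑k) := by
    have := congrArg String.toList h
    simpa [PySem.Int.toStr] using this
  simp only [PySem.Int.toChars] at h2
  rw [if_neg (by omega), if_neg (by omega)] at h2
  simp only [Int.toNat_natCast, Nat.toDigits] at h2
  rw [toDigitsCore_eq_digitsRec (m+1) m [] (by omega),
      toDigitsCore_eq_digitsRec (k+1) k [] (by omega)] at h2
  exact digitsRec_inj m k (by simpa using h2)


theorem li_fold_eq (xs : List Char) :
    (PySem.List.pyRange 0 (xs.length : Int) 1).foldl
      (fun acc i => acc ++ [PySem.List.pyGetD xs i ' ']) [] = xs := by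
  rw [PySem.List.foldl_append_singleton_eq_map]
  simpa using PySem.List.map_pyGetD_pyRange_zero xs ' '

theorem count_fold_eq (xs : List Char) :
    xs.foldl (fun (d : PySem.Dict Char Int) j => match d.get? j with
      | some v => d.insert j (v + 1)
      | none => d.insert j 1) PySem.Dict.empty = PySem.Dict.counter xs := by
  rw [← PySem.Dict.foldl_insert_getD_add_one_eq_counter]
  apply PySem.List.foldl_congr_mem
  intro d j _
  cases h : d.get? j with
  | none => simp [PySem.Dict.getD_eq_get?_getD, h]
  | some v => simp [PySem.Dict.getD_eq_get?_getD, h]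

theorem counter_values_pos (xs : List Char) :
    ∀ v ∈ (PySem.Dict.counter xs).values, 1 ≤ v := by
  intro v hv
  have : (PySem.Dict.counter xs).values
      = (PySem.Set.ofList xs).map (fun k => ((xs.count k : Nat) : Int)) := by
    show (PySem.Dict.counter xs).items.map (·.2) = _
    rw [PySem.Dict.items_counter, List.map_map]; rfl
  rw [this] at hv
  obtain ⟨k, hk, rfl⟩ := List.mem_map.mp hv
  have : k ∈ xs := (PySem.Set.mem_ofList xs k).mp hk
  have := List.count_pos_iff.mpr this
  omega

theorem max_fold_eq (vs : List Int) (h : ∀ v ∈ vs, 1 ≤ v) :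
    vs.foldl (fun m v => if v > m then v else m) (-1)
      = PySem.List.maxD vs (fun v => v) (-1) := by
  cases vs with
  | nil => simp [PySem.List.maxD, PySem.List.max?]
  | cons x t =>
    rw [PySem.List.foldl_congr_mem _ _ (fun m v => max m v) _
      (by intro acc v _; show _ = max acc v; rw [max_def]; split <;> split <;> omega)]
    have hx : max (-1) x = x := by have := h x (by simp); omega
    simp only [PySem.List.maxD, PySem.List.max?_id_cons, Option.getD_some,
      List.foldl_cons, hx]

theorem many_fold_eq (xs : List Char) (M : Int) :
    (PySem.Dict.counter xs).items.foldl
      (fun acc kv => if kv.2 = M then acc ++ [kv.1] else acc) []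
    = (PySem.Set.ofList xs).filter (fun k => decide (((xs.count k : Nat) : Int) = M)) := by
  rw [PySem.List.foldl_append_ite (p := fun kv : Char × Int => kv.2 = M) (f := fun kv => kv.1)]
  rw [PySem.Dict.items_counter, List.filter_map, List.map_map]
  simp [Function.comp_def]

theorem idx_fold_eq (lc many : List Char) (nn : Nat) :
    (PySem.List.pyRange 0 (nn : Int) 1).foldl
      (fun acc k => (PySem.List.pyRange 0 (many.length : Int) 1).foldl
        (fun acc2 l => if PySem.List.pyGetD lc k ' ' = PySem.List.pyGetD many l ' '
                       then acc2 ++ [PySem.Int.toStr k] else acc2) acc) []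
    = (List.range nn).flatMap (fun (k : Nat) =>
        ((PySem.List.pyRange 0 (many.length : Int) 1).filter
          (fun l => decide (PySem.List.pyGetD lc (↑k) ' ' = PySem.List.pyGetD many l ' '))).map
          (fun _ => PySem.Int.toStr (↑k))) := by
  rw [PySem.List.foldl_congr_mem _ _
    (fun acc k => acc ++ ((PySem.List.pyRange 0 (many.length : Int) 1).filter
      (fun l => decide (PySem.List.pyGetD lc k ' ' = PySem.List.pyGetD many l ' '))).map
      (fun _ => PySem.Int.toStr k)) _
    (by intro acc k _
        exact PySem.List.foldl_append_ite
          (fun l => PySem.List.pyGetD lc k ' ' = PySem.List.pyGetD many l ' ')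
          (fun _ => PySem.Int.toStr k) _ acc)]
  rw [PySem.List.foldl_append_eq_flatMap, List.nil_append,
    PySem.List.pyRange_zero_natCast nn, List.flatMap_map]

theorem mem_getD_iff (many : List Char) (c : Char) :
    (∃ l, l ∈ (PySem.List.pyRange 0 (many.length : Int) 1) ∧
        c = PySem.List.pyGetD many l ' ') ↔ c ∈ many := by
  rw [PySem.List.pyRange_zero_natCast]
  constructor
  · rintro ⟨l, hl, hc⟩
    obtain ⟨l', hl', rfl⟩ := List.mem_map.mp hl
    have hlt : l' < many.length := List.mem_range.mp hl'
    rw [PySem.List.pyGetD_natCast, List.getD_eq_getElem _ _ hlt] at hc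
    exact hc ▸ List.getElem_mem hlt
  · intro hc
    obtain ⟨l', hlt, he⟩ := List.mem_iff_getElem.mp hc
    exact ⟨↑l', List.mem_map.mpr ⟨l', List.mem_range.mpr hlt, rfl⟩,
      by rw [PySem.List.pyGetD_natCast, List.getD_eq_getElem _ _ hlt, he]⟩

-- toStr ↑m belongs to the flatMap iff position m's lowered char is in many (m < nn)
theorem mem_idx_iff (lc many : List Char) (nn m : Nat) (hm : m < nn)
    (hinj : ∀ (a b : Nat), PySem.Int.toStr (↑a) = PySem.Int.toStr (↑b) → a = b) :
    (PySem.Int.toStr (↑m) ∈ (List.range nn).flatMap (fun (k : Nat) =>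
        ((PySem.List.pyRange 0 (many.length : Int) 1).filter
          (fun l => decide (PySem.List.pyGetD lc (↑k) ' ' = PySem.List.pyGetD many l ' '))).map
          (fun _ => PySem.Int.toStr (↑k))))
    ↔ PySem.List.pyGetD lc (↑m) ' ' ∈ many := by
  rw [List.mem_flatMap]
  constructor
  · rintro ⟨k, hk, hmem⟩
    obtain ⟨l, hl, he⟩ := List.mem_map.mp hmem
    have hkm : m = k := hinj m k he.symm
    subst hkm
    have hl' := List.mem_filter.mp hl
    exact (mem_getD_iff many _).mp ⟨l, hl'.1, of_decide_eq_true hl'.2⟩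
  · intro hc
    obtain ⟨l, hl, he⟩ := (mem_getD_iff many _).mpr hc
    exact ⟨m, List.mem_range.mpr hm,
      List.mem_map.mpr ⟨l, List.mem_filter.mpr ⟨hl, decide_eq_true he⟩, rfl⟩⟩

theorem filter_range_getD {α : Type} (l : List α) (d : α) (p : α → Bool) :
    (((List.range l.length).filter (fun i => p (l.getD i d))).map (fun i => l.getD i d))
      = l.filter p := by
  induction l with
  | nil => simp
  | cons x t ih =>
    rw [List.length_cons, List.range_succ_eq_map]
    simp only [List.filter_cons, List.getD_cons_zero, List.filter_map]
    have hcomp : ((fun i => p ((x :: t).getD i d)) ∘ Nat.succ) = (fun i => p (t.getD i d)) := by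
      funext i; simp
    have hcomp2 : ((fun i => (x :: t).getD i d) ∘ Nat.succ) = (fun i => t.getD i d) := by
      funext i; simp
    by_cases hp : p x
    · simp only [hp, if_pos]
      rw [List.map_cons, List.map_map, hcomp, hcomp2, ih]; simp
    · simp only [hp, Bool.false_eq_true, if_neg, not_false_iff]
      rw [List.map_map, hcomp, hcomp2, ih]

theorem zip_self_map {α : Type} (l : List α) : l.zip l = l.map (fun x => (x, x)) := by
  induction l with
  | nil => rfl
  | cons x t ih => simp [ih]
def manyOf (lc : List Char) (M : Int) : List Char :=
  (PySem.Set.ofList lc).filter (fun k => decide (((lc.count k : Nat) : Int) = M))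

def idxOf (lc : List Char) (M : Int) : List String :=
  (List.range lc.length).flatMap (fun (k : Nat) =>
    ((PySem.List.pyRange 0 ((manyOf lc M).length : Int) 1).filter
      (fun l => decide (PySem.List.pyGetD lc (↑k) ' ' = PySem.List.pyGetD (manyOf lc M) l ' '))).map
      (fun _ => PySem.Int.toStr (↑k)))

theorem zip_lower_filter (cs : List Char) (p : Char × Char → Bool) :
    ((cs.zip (PySem.Chars.lower cs)).filter p).map (fun q => q.1)
      = cs.filter (fun c => p (c, PySem.Chars.lowerChar c)) := by
  show ((cs.zip (cs.map PySem.Chars.lowerChar)).filter p).map (fun q => q.1) = _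
  rw [List.zip_map_right, zip_self_map, List.map_map, List.filter_map, List.map_map]
  simp [Function.comp_def, Prod.map]

theorem final_eq (cs : List Char) (M : Int) :
    String.ofList ((PySem.List.pyRange 0 (cs.length : Int) 1).foldl
      (fun acc m => if PySem.Int.toStr m ∈ idxOf (PySem.Chars.lower cs) M then acc
                    else acc ++ [PySem.List.pyGetD cs m ' ']) [])
    = String.ofList (((cs.zip (PySem.Chars.lower cs)).filter
        (fun p => decide ((PySem.Dict.counter (PySem.Chars.lower cs)).getD p.2 0 ≠ M))).map
        (fun p => p.1)) := by
  have hlen : (PySem.Chars.lower cs).length = cs.length := by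
    show (cs.map PySem.Chars.lowerChar).length = cs.length
    exact List.length_map ..
  apply congrArg
  rw [PySem.List.foldl_congr_mem _ _
    (fun acc m => if ¬ (PySem.Int.toStr m ∈ idxOf (PySem.Chars.lower cs) M)
                  then acc ++ [PySem.List.pyGetD cs m ' '] else acc) _
    (by intro acc m _; by_cases h : PySem.Int.toStr m ∈ idxOf (PySem.Chars.lower cs) M <;> simp [h])]
  rw [PySem.List.foldl_append_ite
    (fun m => ¬ (PySem.Int.toStr m ∈ idxOf (PySem.Chars.lower cs) M))
    (fun m => PySem.List.pyGetD cs m ' ')]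
  rw [List.nil_append, PySem.List.pyRange_zero_natCast cs.length, List.filter_map, List.map_map]
  have hmapf : ((fun m => PySem.List.pyGetD cs m ' ') ∘ (fun (k : Nat) => ((k : Int)))) =
      (fun i => cs.getD i ' ') := by
    funext i; exact PySem.List.pyGetD_natCast cs i ' '
  have hcong : ∀ i ∈ List.range cs.length,
      ((fun m => decide (¬ (PySem.Int.toStr m ∈ idxOf (PySem.Chars.lower cs) M))) ∘
        (fun (k : Nat) => ((k : Int)))) i
      = (fun c => decide ((PySem.Dict.counter (PySem.Chars.lower cs)).getD
          (PySem.Chars.lowerChar c) 0 ≠ M)) (cs.getD i ' ') := by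
    intro i hi
    have hi' : i < cs.length := List.mem_range.mp hi
    have hi2 : i < (PySem.Chars.lower cs).length := by omega
    have h2 : PySem.List.pyGetD (PySem.Chars.lower cs) (↑i) ' '
        = PySem.Chars.lowerChar (cs.getD i ' ') := by
      rw [PySem.List.pyGetD_natCast, List.getD_eq_getElem _ _ hi2]
      show (cs.map PySem.Chars.lowerChar)[i] = _
      rw [List.getElem_map, List.getD_eq_getElem _ _ hi']
    have hmem : PySem.Chars.lowerChar (cs.getD i ' ') ∈ PySem.Chars.lower cs := by
      rw [← h2, PySem.List.pyGetD_natCast, List.getD_eq_getElem _ _ hi2]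
      exact List.getElem_mem hi2
    apply decide_eq_decide.mpr
    apply not_congr
    show PySem.Int.toStr (↑i) ∈ idxOf (PySem.Chars.lower cs) M ↔ _
    unfold idxOf
    rw [mem_idx_iff (PySem.Chars.lower cs) (manyOf (PySem.Chars.lower cs) M)
      (PySem.Chars.lower cs).length i (by omega) toStr_natCast_inj]
    rw [h2]
    unfold manyOf
    rw [List.mem_filter, PySem.Set.mem_ofList, PySem.Dict.getD_counter]
    constructor
    · intro h
      exact of_decide_eq_true h.2
    · intro h
      exact ⟨hmem, decide_eq_true h⟩
  rw [List.filter_congr hcong, hmapf]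
  rw [filter_range_getD cs ' '
    (fun c => decide ((PySem.Dict.counter (PySem.Chars.lower cs)).getD (PySem.Chars.lowerChar c) 0 ≠ M))]
  exact (zip_lower_filter cs
    (fun q => decide ((PySem.Dict.counter (PySem.Chars.lower cs)).getD q.2 0 ≠ M))).symm

theorem main_eq (call : String) : solution call = solution_alt call := by
  unfold solution solution_alt
  simp only [li_fold_eq, count_fold_eq, PySem.Dict.foldl_insert_getD_add_one_eq_counter]
  rw [max_fold_eq _ (counter_values_pos _), many_fold_eq]
  rw [idx_fold_eq _ _ ((PySem.Chars.lower call.toList).length)]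
  exact final_eq call.toList _


-- ===== VERDICT (by name: the statement is the Claim_ definition above) =====
theorem solution_spec : Claim_equal_solution := by
  intro call _
  unfold Spec_solution
  exact main_eq call
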